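-- pv_equiv track=rewrite | github.com/CastroLuis94/Tp-individual-Algoritmos-3 | auxiliares.py | creciente
-- ===== SOURCE A (Python) =====
-- def creciente(vector, posiciones):
--     i = 0
--     posiciones = list(posiciones)
--     posiciones.sort()
--     while i < len(posiciones) - 1:
--         if vector[posiciones[i]] >= vector[posiciones[i+1]]:
--             return False
--         i+=1
--     return True
-- ===== SOURCE B (Python) =====
-- def creciente(vector, posiciones):
--     vals = [vector[p] for p in sorted(posiciones)]
--     return vals == sorted(vals) and len(set(vals)) == len(vals)
-- ===== Notes on version B (the rewrite author's own statement) =====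
-- stated objective: alternative
-- what changed: Replaces A's early-exit adjacent-pair index scan with two whole-structure aggregate passes: compare the value list with its sorted copy (non-decreasing) and compare len(set(vals)) with len(vals) (distinct); together these are exactly strictly increasing.
-- outside the precondition, e.g. on creciente([1], [5]): A returns True, B raises IndexError
import Mathlib
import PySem

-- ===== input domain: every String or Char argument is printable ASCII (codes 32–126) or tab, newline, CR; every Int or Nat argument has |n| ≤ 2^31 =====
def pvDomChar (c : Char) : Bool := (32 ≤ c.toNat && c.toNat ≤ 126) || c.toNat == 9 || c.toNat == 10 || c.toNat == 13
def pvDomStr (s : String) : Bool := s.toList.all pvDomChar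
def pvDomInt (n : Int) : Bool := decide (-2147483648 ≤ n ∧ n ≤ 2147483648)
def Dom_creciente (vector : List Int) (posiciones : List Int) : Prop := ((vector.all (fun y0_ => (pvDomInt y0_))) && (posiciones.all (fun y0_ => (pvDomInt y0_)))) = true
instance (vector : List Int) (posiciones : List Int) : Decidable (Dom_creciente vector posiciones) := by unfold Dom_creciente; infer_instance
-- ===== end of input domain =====

-- B replaces A's early-exit adjacent-pair scan with two aggregate passes (sorted-copy
-- comparison + set-size distinctness); same return value on every input admitted by Pre_.

-- ===== PORT A =====
-- the while-loop of A: i runs while i < len(posiciones) - 1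
def crecienteGo (vector : List Int) (sp : List Int) (i : Nat) : Bool :=
  if i + 1 < sp.length then
    if PySem.List.pyGetD vector (PySem.List.pyGetD sp (i : Int) 0) 0 ≥
       PySem.List.pyGetD vector (PySem.List.pyGetD sp ((i : Int) + 1) 0) 0 then false
    else crecienteGo vector sp (i + 1)
  else true
termination_by sp.length - i

def creciente (vector : List Int) (posiciones : List Int) : Bool :=
  crecienteGo vector (PySem.List.sorted posiciones (fun x => x) false) 0

-- ===== PORT B =====
def creciente_alt (vector : List Int) (posiciones : List Int) : Bool :=
  let vals := (PySem.List.sorted posiciones (fun x => x) false).map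
    (fun p => PySem.List.pyGetD vector p 0)
  decide (vals = PySem.List.sorted vals (fun x => x) false) &&
    ((PySem.Set.ofList vals).length == vals.length)

-- ===== PRECONDITION & SPEC =====
-- Pre_ excludes inputs with a position outside Python's index range -len(vector)..len(vector)-1:
-- there A raises IndexError when len(posiciones) ≥ 2, and still returns True on shorter position
-- lists only because its loop never runs; B's comprehension indexes every position and raises.
def Pre_creciente (vector : List Int) (posiciones : List Int) : Prop :=
  ∀ p ∈ posiciones, PySem.Raise.InRange vector.length p
instance (vector : List Int) (posiciones : List Int) : Decidable (Pre_creciente vector posiciones) := by unfold Pre_creciente; infer_instance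
def pvWitness_creciente : List Int × List Int := ([3, 1, 2], [1, 2, 0])

def Spec_creciente (vector : List Int) (posiciones : List Int) (out : Bool) : Prop := out = creciente_alt vector posiciones
instance (vector : List Int) (posiciones : List Int) (out : Bool) : Decidable (Spec_creciente vector posiciones out) := by unfold Spec_creciente; infer_instance

-- ===== CLAIM (what is proved, stated in full; the proofs are below) =====
def Claim_equal_creciente : Prop := ∀ (vector : List Int) (posiciones : List Int), Dom_creciente vector posiciones → Pre_creciente vector posiciones → Spec_creciente vector posiciones (creciente vector posiciones)

-- ===== LEMMAS AND PROOFS =====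

-- A's loop from index i checks exactly the adjacent chain on the mapped values of sp.drop i
theorem crecienteGo_eq_chain (vector sp : List Int) (i : Nat) :
    crecienteGo vector sp i =
      decide (List.IsChain (· < ·)
        ((sp.drop i).map (fun p => PySem.List.pyGetD vector p 0))) := by
  fun_induction crecienteGo vector sp i with
  | case1 i h hge =>
    have h1 : i < sp.length := by omega
    have e1 : PySem.List.pyGetD sp (i : Int) 0 = sp[i] := by
      rw [PySem.List.pyGetD_natCast]; exact List.getD_eq_getElem _ _ h1
    have e2 : PySem.List.pyGetD sp ((i : Int) + 1) 0 = sp[i + 1] := by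
      rw [show ((i : Int) + 1) = ((i + 1 : Nat) : Int) by push_cast; ring,
        PySem.List.pyGetD_natCast]
      exact List.getD_eq_getElem _ _ h
    rw [e1, e2] at hge
    rw [List.drop_eq_getElem_cons h1, List.drop_eq_getElem_cons h]
    simp only [List.map_cons, List.isChain_cons_cons]
    symm
    rw [decide_eq_false_iff_not]
    rintro ⟨hlt, -⟩
    omega
  | case2 i h hge ih =>
    have h1 : i < sp.length := by omega
    have e1 : PySem.List.pyGetD sp (i : Int) 0 = sp[i] := by
      rw [PySem.List.pyGetD_natCast]; exact List.getD_eq_getElem _ _ h1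
    have e2 : PySem.List.pyGetD sp ((i : Int) + 1) 0 = sp[i + 1] := by
      rw [show ((i : Int) + 1) = ((i + 1 : Nat) : Int) by push_cast; ring,
        PySem.List.pyGetD_natCast]
      exact List.getD_eq_getElem _ _ h
    rw [e1, e2] at hge
    have hlt : PySem.List.pyGetD vector sp[i] 0 < PySem.List.pyGetD vector sp[i + 1] 0 := by omega
    rw [ih, List.drop_eq_getElem_cons h1, List.drop_eq_getElem_cons h]
    simp only [List.map_cons, List.isChain_cons_cons]
    simp [hlt]
  | case3 i h =>
    have hle : (sp.drop i).length ≤ 1 := by simp [List.length_drop]; omega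
    match hd : sp.drop i, hle with
    | [], _ => simp
    | [a], _ => simp

-- strict pairwise = (non-decreasing pairwise) ∧ nodup
theorem pairwise_lt_iff (l : List Int) :
    l.Pairwise (· < ·) ↔ l.Pairwise (· ≤ ·) ∧ l.Nodup := by
  constructor
  · exact fun h => ⟨h.imp le_of_lt, h.imp ne_of_lt⟩
  · rintro ⟨h1, h2⟩
    exact (h1.and h2).imp fun ⟨a, b⟩ => lt_of_le_of_ne a b

-- a list equals its stable sort iff it is already pairwise ≤
theorem eq_sorted_iff (l : List Int) :
    l = PySem.List.sorted l (fun x => x) false ↔ l.Pairwise (· ≤ ·) := by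
  constructor
  · intro h
    have h2 := PySem.List.sorted_pairwise l (fun x => x)
    rw [← h] at h2
    simpa using h2
  · intro h
    exact (PySem.List.sorted_eq_self_of_pairwise l (fun x => x) h).symm

-- Nodup across an appended singleton
theorem nodup_app_single (xs : List Int) (x : Int) :
    (xs ++ [x]).Nodup ↔ xs.Nodup ∧ x ∉ xs := by
  simp [List.nodup_append]
  intro _
  constructor
  · exact fun h hm => h x hm rfl
  · exact fun h a ha he => h (he ▸ ha)

-- set(l) has the same length as l iff l has no duplicates
theorem ofList_length_iff (l : List Int) :
    (PySem.Set.ofList l).length = l.length ↔ l.Nodup := by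
  induction l using List.reverseRecOn with
  | nil => simp [PySem.Set.ofList_nil]
  | append_singleton xs x ih =>
    rw [PySem.Set.ofList_append_singleton, PySem.Set.add_eq_ite, nodup_app_single]
    by_cases hx : x ∈ PySem.Set.ofList xs
    · have hmem : x ∈ xs := (PySem.Set.mem_ofList xs x).mp hx
      have hle := PySem.Set.length_ofList_le (xs := xs)
      rw [if_pos hx]
      simp only [List.length_append, List.length_cons, List.length_nil]
      constructor
      · intro hlen; exact absurd hlen (by omega)
      · rintro ⟨-, hnm⟩; exact absurd hmem hnm
    · have hmem : x ∉ xs := fun hm => hx ((PySem.Set.mem_ofList xs x).mpr hm)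
      rw [if_neg hx]
      simp only [List.length_append, List.length_cons, List.length_nil]
      constructor
      · intro hlen; exact ⟨ih.mp (by omega), hmem⟩
      · rintro ⟨hnd, -⟩; rw [ih.mpr hnd]

-- the two aggregate tests of B characterise the strict adjacent chain
theorem bridge (l : List Int) :
    decide (List.IsChain (· < ·) l) =
      (decide (l = PySem.List.sorted l (fun x => x) false) &&
        ((PySem.Set.ofList l).length == l.length)) := by
  rw [Bool.eq_iff_iff]
  simp only [decide_eq_true_eq, Bool.and_eq_true, beq_iff_eq]
  rw [List.isChain_iff_pairwise, pairwise_lt_iff, eq_sorted_iff, ofList_length_iff]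

-- ===== VERDICT (by name: the statement is the Claim_ definition above) =====
theorem creciente_spec : Claim_equal_creciente := by
  intro vector posiciones _ _
  unfold Spec_creciente creciente creciente_alt
  rw [crecienteGo_eq_chain]
  simp only [List.drop_zero]
  exact bridge _
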